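-- pv_equiv track=rewrite | github.com/SambaHFall/EtudeFrInclusif | src/naive_rule_based.py | last_non_alpha_char
-- ===== SOURCE A (Python) =====
-- def last_non_alpha_char(wd : str) :
-- 	cpt = 0
-- 	last = None
-- 	for char in wd :
-- 		cpt += 1
-- 		asc = ord(char)
-- 		if not( asc >= 97 and asc <= 122 ) and not ( 48 <= asc <= 57 ) :
-- 			last = cpt
-- 	return last
-- ===== SOURCE B (Python) =====
-- def last_non_alpha_char(wd: str):
--     for i, c in reversed(list(enumerate(wd))):
--         asc = ord(c)
--         if not (97 <= asc <= 122) and not (48 <= asc <= 57):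
--             return i + 1
--     return None
-- ===== Notes on version B (the rewrite author's own statement) =====
-- stated objective: alternative
-- what changed: B scans the string backwards over reversed(enumerate(wd)) and returns i+1 at the first hit (early exit), instead of A's forward scan of the whole string with a counter and an overwritten accumulator.
import Mathlib
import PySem

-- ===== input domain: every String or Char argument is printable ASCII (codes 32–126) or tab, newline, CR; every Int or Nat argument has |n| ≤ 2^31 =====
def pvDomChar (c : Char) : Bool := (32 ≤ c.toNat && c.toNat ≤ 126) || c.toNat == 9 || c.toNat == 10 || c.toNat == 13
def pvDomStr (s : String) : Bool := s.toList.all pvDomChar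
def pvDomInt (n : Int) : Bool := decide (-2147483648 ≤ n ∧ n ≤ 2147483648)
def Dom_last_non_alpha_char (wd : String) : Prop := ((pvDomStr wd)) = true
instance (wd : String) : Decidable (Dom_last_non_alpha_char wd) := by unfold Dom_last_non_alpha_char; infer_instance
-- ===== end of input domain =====

-- ===== PORT A =====
-- forward scan: counter cpt, accumulator last overwritten at every hit
def last_non_alpha_char (wd : String) : Option Int :=
  (wd.toList.foldl
    (fun (st : Int × Option Int) (char : Char) =>
      let cpt := st.1 + 1
      let asc : Int := char.toNat
      if (!(decide (asc ≥ 97) && decide (asc ≤ 122))) && (!(decide (48 ≤ asc) && decide (asc ≤ 57))) then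
        (cpt, some cpt)
      else (cpt, st.2))
    (0, none)).2

-- ===== PORT B =====
-- backward scan with early exit over reversed(enumerate(wd))
def lastNonAlphaGo : List (Int × Char) → Option Int
  | [] => none
  | (i, c) :: rest =>
      let asc : Int := c.toNat
      if (!(decide (97 ≤ asc) && decide (asc ≤ 122))) && (!(decide (48 ≤ asc) && decide (asc ≤ 57))) then
        some (i + 1)
      else lastNonAlphaGo rest

def last_non_alpha_char_alt (wd : String) : Option Int :=
  lastNonAlphaGo (PySem.List.enumerate wd.toList 0).reverse

-- ===== PRECONDITION & SPEC =====
def Spec_last_non_alpha_char (wd : String) (out : Option Int) : Prop := out = last_non_alpha_char_alt wd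
instance (wd : String) (out : Option Int) : Decidable (Spec_last_non_alpha_char wd out) := by unfold Spec_last_non_alpha_char; infer_instance

-- ===== CLAIM =====
def Claim_equal_last_non_alpha_char : Prop := ∀ (wd : String), Dom_last_non_alpha_char wd → Spec_last_non_alpha_char wd (last_non_alpha_char wd)

-- ===== LEMMAS AND PROOFS =====
theorem lastNonAlphaGo_append (xs ys : List (Int × Char)) :
    lastNonAlphaGo (xs ++ ys) = (lastNonAlphaGo xs).orElse (fun _ => lastNonAlphaGo ys) := by
  induction xs with
  | nil => rfl
  | cons p rest ih =>
    obtain ⟨i, c⟩ := p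
    simp only [List.cons_append, lastNonAlphaGo]
    split <;> simp [ih, Option.orElse]

theorem fold_eq_go (l : List Char) (n : Int) (acc : Option Int) :
    (l.foldl
      (fun (st : Int × Option Int) (char : Char) =>
        let cpt := st.1 + 1
        let asc : Int := char.toNat
        if (!(decide (asc ≥ 97) && decide (asc ≤ 122))) && (!(decide (48 ≤ asc) && decide (asc ≤ 57))) then
          (cpt, some cpt)
        else (cpt, st.2))
      (n, acc)).2
    = ((lastNonAlphaGo (PySem.List.enumerate l n).reverse).orElse (fun _ => acc)) := by
  induction l generalizing n acc with
  | nil => simp [PySem.List.enumerate_nil, lastNonAlphaGo, Option.orElse]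
  | cons c rest ih =>
    simp only [List.foldl_cons, PySem.List.enumerate_cons, List.reverse_cons,
      lastNonAlphaGo_append]
    rw [ih]
    simp only [lastNonAlphaGo]
    by_cases h : ((!(decide (97 ≤ (c.toNat : Int)) && decide ((c.toNat : Int) ≤ 122))) && (!(decide (48 ≤ (c.toNat : Int)) && decide ((c.toNat : Int) ≤ 57)))) = true
    · simp only [ge_iff_le] at *
      rw [if_pos h, if_pos h]
      cases lastNonAlphaGo (PySem.List.enumerate rest (n + 1)).reverse <;> simp [Option.orElse]
    · simp only [ge_iff_le] at *
      rw [if_neg h, if_neg h]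
      cases lastNonAlphaGo (PySem.List.enumerate rest (n + 1)).reverse <;> simp [Option.orElse]

-- ===== VERDICT =====
theorem last_non_alpha_char_spec : Claim_equal_last_non_alpha_char := by
  intro wd _
  show last_non_alpha_char wd = last_non_alpha_char_alt wd
  unfold last_non_alpha_char last_non_alpha_char_alt
  rw [fold_eq_go]
  cases lastNonAlphaGo (PySem.List.enumerate wd.toList 0).reverse <;> simp [Option.orElse]
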